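-- pv_equiv track=rewrite | github.com/hwan1111/Coding-Test | 프로그래머스/unrated/181894. 2의 영역/2의 영역.py | solution
-- ===== SOURCE A (Python) =====
-- def solution(arr):
--     answer = []
--     result = []
--     for i in range(len(arr)):
--         if arr[i] == 2:
--             result += arr[i:]
--             break
--
--     for j in range(len(result)):
--         if result[j] == 2:
--             answer = result[:j+1]
--
--     if answer:
--         return answer
--     else:
--         return [-1]
-- ===== SOURCE B (Python) =====
-- def solution(arr):
--     # first and last occurrence of 2 via list.index on arr and its reverse, then one slice
--     if 2 not in arr:
--         return [-1]
--     i = arr.index(2)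
--     j = len(arr) - 1 - arr[::-1].index(2)
--     return arr[i:j + 1]
-- ===== Notes on version B (the rewrite author's own statement) =====
-- stated objective: alternative
-- what changed: A scans for the first 2, copies the suffix, then rescans that suffix re-slicing a fresh prefix at every 2; B locates the first and last occurrence of 2 with list.index on the list and on its reverse and performs a single slice.
import Mathlib
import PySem

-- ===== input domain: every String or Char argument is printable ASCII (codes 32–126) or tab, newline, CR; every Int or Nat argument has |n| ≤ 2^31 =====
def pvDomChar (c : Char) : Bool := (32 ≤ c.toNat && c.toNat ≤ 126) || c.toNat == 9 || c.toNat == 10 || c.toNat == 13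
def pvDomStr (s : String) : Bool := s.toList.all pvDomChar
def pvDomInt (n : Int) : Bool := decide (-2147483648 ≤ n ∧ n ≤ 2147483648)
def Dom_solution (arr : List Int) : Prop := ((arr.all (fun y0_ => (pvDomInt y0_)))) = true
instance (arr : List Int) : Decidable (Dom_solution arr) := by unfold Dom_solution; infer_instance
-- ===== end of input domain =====

-- B replaces A's scan-then-rescan with repeated prefix re-slicing by locating the first
-- and last occurrence of 2 (the latter via the reversed list) and slicing once (objective: alternative).

-- ===== PORT A =====
-- A's first loop scans indices left to right and, on the first arr[i] == 2, sets
-- result = [] + arr[i:] and breaks; arr[i:] is the current suffix, so the index loop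
-- is transcribed as the obvious structural recursion over the same suffix.
def solutionLoop1 : List Int → List Int
  | [] => []
  | x :: xs => if x = 2 then x :: xs else solutionLoop1 xs

-- A's second loop: for j in range(len(result)): if result[j] == 2: answer = result[:j+1]
def solution (arr : List Int) : List Int :=
  let result := solutionLoop1 arr
  let answer := (PySem.List.pyRange 0 result.length 1).foldl
      (fun ans j => if PySem.List.pyGetD result j 0 = 2
                    then PySem.List.slice result none (some (j + 1)) else ans) []
  if answer ≠ [] then answer else [-1]

-- ===== PORT B =====
-- B: if 2 not in arr -> [-1]; else i = arr.index(2); j = len(arr)-1-arr[::-1].index(2);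
-- return arr[i:j+1].  index() and [::-1] never fail under the membership guard, so the
-- .getD defaults below are dead code introduced only to make the port total.
def solution_alt (arr : List Int) : List Int :=
  if 2 ∈ arr then
    let i := (PySem.List.index? arr 2).getD 0
    let rev := (PySem.List.slice? arr none none (-1)).getD []
    let r := (PySem.List.index? rev 2).getD 0
    PySem.List.slice arr (some (i : Int)) (some (((arr.length : Int) - 1 - (r : Int)) + 1))
  else [-1]

-- ===== PRECONDITION & SPEC =====
def Spec_solution (arr : List Int) (out : List Int) : Prop := out = solution_alt arr
instance (arr : List Int) (out : List Int) : Decidable (Spec_solution arr out) := by unfold Spec_solution; infer_instance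

-- ===== CLAIM (what is proved, stated in full; the proofs are below) =====
def Claim_equal_solution : Prop := ∀ (arr : List Int), Dom_solution arr → Spec_solution arr (solution arr)

-- ===== LEMMAS AND PROOFS =====

-- index of the last occurrence of 2 (none if absent)
def lastIdx2 : List Int → Option Nat
  | [] => none
  | x :: xs =>
    match lastIdx2 xs with
    | some k => some (k + 1)
    | none => if x = 2 then some 0 else none

theorem lastIdx2_eq_none_iff (l : List Int) : lastIdx2 l = none ↔ 2 ∉ l := by
  induction l with
  | nil => simp [lastIdx2]
  | cons x xs ih =>
    simp only [lastIdx2, List.mem_cons]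
    cases h : lastIdx2 xs with
    | some k => simp [← ih, h]
    | none =>
      rw [h] at ih
      by_cases hx : x = 2 <;> simp [hx, ← ih, eq_comm]

theorem lastIdx2_lt_length {l : List Int} {k : Nat} (h : lastIdx2 l = some k) : k < l.length := by
  induction l generalizing k with
  | nil => simp [lastIdx2] at h
  | cons x xs ih =>
    simp only [lastIdx2] at h
    cases h' : lastIdx2 xs with
    | some k' => rw [h'] at h; simp at h; subst h; simpa using Nat.succ_lt_succ (ih h')
    | none =>
      rw [h'] at h
      by_cases hx : x = 2
      · simp [hx] at h
        simp only [List.length_cons]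
        omega
      · simp [hx] at h

theorem lastIdx2_append_right {ys : List Int} {k : Nat} (xs : List Int)
    (h : lastIdx2 ys = some k) : lastIdx2 (xs ++ ys) = some (xs.length + k) := by
  induction xs with
  | nil => simpa using h
  | cons x xs ih =>
    simp only [List.cons_append, lastIdx2, ih, List.length_cons, Option.some.injEq]
    omega

theorem loop1_eq (arr : List Int) :
    solutionLoop1 arr = arr.dropWhile (fun x => decide (x ≠ 2)) := by
  induction arr with
  | nil => rfl
  | cons x xs ih =>
    by_cases hx : x = 2 <;> simp [solutionLoop1, List.dropWhile, hx, ih]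

theorem lastIdx2_append_singleton_of_ne {x : Int} (hx : x ≠ 2) (xs : List Int) :
    lastIdx2 (xs ++ [x]) = lastIdx2 xs := by
  induction xs with
  | nil => simp [lastIdx2, hx]
  | cons y ys ih => simp only [List.cons_append, lastIdx2, ih]

theorem lastIdx2_append_two (xs : List Int) : lastIdx2 (xs ++ [2]) = some xs.length := by
  have h0 : lastIdx2 [(2 : Int)] = some 0 := by simp [lastIdx2]
  simpa using lastIdx2_append_right xs h0

-- A's second loop computes the prefix of result up to and including its last 2
theorem foldA_eq (res : List Int) :
    (PySem.List.pyRange 0 res.length 1).foldl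
      (fun ans j => if PySem.List.pyGetD res j 0 = 2
                    then PySem.List.slice res none (some (j + 1)) else ans) []
    = match lastIdx2 res with
      | some k => res.take (k + 1)
      | none => [] := by
  induction res using List.reverseRecOn with
  | nil => simp [PySem.List.pyRange, lastIdx2]
  | append_singleton xs x ih =>
    have hlen : ((xs ++ [x]).length : Int) = (xs.length : Int) + 1 := by
      simp
    rw [hlen, PySem.List.pyRange_one_succ_right (by positivity), List.foldl_append]
    have hcongr :
        (PySem.List.pyRange 0 (xs.length : Int)).foldl
          (fun ans j => if PySem.List.pyGetD (xs ++ [x]) j 0 = 2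
                        then PySem.List.slice (xs ++ [x]) none (some (j + 1)) else ans) []
        = (PySem.List.pyRange 0 (xs.length : Int)).foldl
          (fun ans j => if PySem.List.pyGetD xs j 0 = 2
                        then PySem.List.slice xs none (some (j + 1)) else ans) [] := by
      apply PySem.List.foldl_congr_mem
      intro acc j hj
      rw [PySem.List.mem_pyRange_one] at hj
      have hj1 : (0:Int) ≤ j := hj.1
      have hj2 : j < (xs.length : Int) := hj.2
      have hget : PySem.List.pyGetD (xs ++ [x]) j 0 = PySem.List.pyGetD xs j 0 := by
        rw [PySem.List.pyGetD_eq_getElem _ _ hj1 (by simp; omega),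
            PySem.List.pyGetD_eq_getElem _ _ hj1 (by omega)]
        exact List.getElem_append_left (by omega)
      have hslice : PySem.List.slice (xs ++ [x]) none (some (j + 1))
          = PySem.List.slice xs none (some (j + 1)) := by
        have hj' : (j + 1).toNat ≤ xs.length := by omega
        rw [show j + 1 = ((j+1).toNat : Int) by omega]
        rw [PySem.List.slice_to_natCast, PySem.List.slice_to_natCast]
        exact List.take_append_of_le_length hj'
      rw [hget, hslice]
    rw [hcongr, ih]
    have hgetlast : PySem.List.pyGetD (xs ++ [x]) (xs.length : Int) 0 = x := by
      rw [PySem.List.pyGetD_eq_getElem _ _ (by positivity) (by simp)]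
      simp
    by_cases hx : x = 2
    · -- last element is 2: answer becomes the whole list
      subst hx
      rw [lastIdx2_append_two, List.foldl_cons, List.foldl_nil, if_pos hgetlast]
      rw [show (xs.length : Int) + 1 = ((xs.length + 1 : Nat) : Int) by push_cast; ring,
          PySem.List.slice_to_natCast]
    · -- last element is not 2: answer unchanged
      rw [List.foldl_cons, List.foldl_nil, if_neg (by rw [hgetlast]; exact hx)]
      rw [lastIdx2_append_singleton_of_ne hx]
      cases hk : lastIdx2 xs with
      | none => rfl
      | some k =>
        have hklt := lastIdx2_lt_length hk
        exact (List.take_append_of_le_length (by omega)).symm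

-- list.index(2) finds the length of the 2-free prefix
theorem index?_eq_takeWhile_length {l : List Int} (h : 2 ∈ l) :
    PySem.List.index? l 2 = some ((l.takeWhile (fun x => decide (x ≠ 2))).length) := by
  induction l with
  | nil => simp at h
  | cons x xs ih =>
    by_cases hx : x = 2
    · subst hx
      rw [PySem.List.index?_cons_self]
      simp
    · have h2 : 2 ∈ xs := by rcases List.mem_cons.mp h with h' | h'
                             · exact absurd h'.symm hx
                             · exact h'
      rw [PySem.List.index?_cons_of_ne xs (by simpa using hx), ih h2]
      simp [hx]

-- the 2-free prefix of the reverse measures the last index of 2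
theorem takeWhile_reverse_length {l : List Int} {k : Nat} (hk : lastIdx2 l = some k) :
    (l.reverse.takeWhile (fun x => decide (x ≠ 2))).length = l.length - 1 - k := by
  induction l using List.reverseRecOn generalizing k with
  | nil => simp [lastIdx2] at hk
  | append_singleton xs x ih =>
    by_cases hx : x = 2
    · subst hx
      rw [lastIdx2_append_two] at hk
      simp only [Option.some.injEq] at hk
      subst hk
      simp
    · rw [lastIdx2_append_singleton_of_ne hx] at hk
      have hklt := lastIdx2_lt_length hk
      have ih' := ih hk
      rw [List.reverse_append]
      simp only [ne_eq, decide_not] at ih' ⊢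
      simp only [List.reverse_cons, List.reverse_nil, List.nil_append, List.cons_append,
        hx, decide_false, Bool.not_false, List.takeWhile_cons_of_pos, List.length_cons,
        List.length_append, List.length_nil, zero_add, add_tsub_cancel_right, ih']
      omega

theorem two_mem_dropWhile {arr : List Int} (h : 2 ∈ arr) :
    2 ∈ arr.dropWhile (fun x => decide (x ≠ 2)) := by
  have hsplit := List.takeWhile_append_dropWhile (p := fun x => decide (x ≠ 2)) (l := arr)
  rw [← hsplit] at h
  rcases List.mem_append.mp h with h1 | h2
  · have := List.mem_takeWhile_imp h1
    simp at this
  · exact h2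

-- ===== VERDICT (by name: the statement is the Claim_ definition above) =====
theorem solution_spec : Claim_equal_solution := by
  intro arr _
  unfold Spec_solution solution solution_alt
  simp only []
  rw [loop1_eq, foldA_eq]
  by_cases h2 : 2 ∈ arr
  · -- 2 occurs: both return arr[first : last+1]
    obtain ⟨k, hk⟩ : ∃ k, lastIdx2 arr = some k := by
      cases h : lastIdx2 arr with
      | none => exact absurd ((lastIdx2_eq_none_iff arr).mp h) (by simpa using h2)
      | some k => exact ⟨k, rfl⟩
    set pre := arr.takeWhile (fun x => decide (x ≠ 2)) with hpre
    set res := arr.dropWhile (fun x => decide (x ≠ 2)) with hres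
    have hsplit : pre ++ res = arr := List.takeWhile_append_dropWhile
    have h2res : 2 ∈ res := two_mem_dropWhile h2
    obtain ⟨k', hk'⟩ : ∃ k', lastIdx2 res = some k' := by
      cases h : lastIdx2 res with
      | none => exact absurd ((lastIdx2_eq_none_iff res).mp h) (by simpa using h2res)
      | some k' => exact ⟨k', rfl⟩
    have hkk : k = pre.length + k' := by
      have := lastIdx2_append_right pre hk'
      rw [hsplit, hk] at this
      simp only [Option.some.injEq] at this
      omega
    rw [hk', if_pos h2, index?_eq_takeWhile_length h2, PySem.List.slice?_none_none_neg_one,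
        index?_eq_takeWhile_length (by simpa using h2)]
    simp only [Option.getD_some, ← hpre]
    have hresne : res ≠ [] := by intro h; rw [h] at h2res; simp at h2res
    have hansne : res.take (k' + 1) ≠ [] := by
      simp [List.take_eq_nil_iff, hresne]
    rw [if_pos hansne]
    have hklt := lastIdx2_lt_length hk
    have hrev := takeWhile_reverse_length hk
    rw [hrev]
    have hcast2 : ((arr.length : Int) - 1 - ((arr.length - 1 - k : Nat) : Int)) + 1
        = ((k + 1 : Nat) : Int) := by push_cast; omega
    rw [hcast2, PySem.List.slice_natCast]
    have hdrop : arr.drop pre.length = res := by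
      rw [← hsplit]; exact List.drop_left
    rw [hdrop, show k + 1 - pre.length = k' + 1 by omega]
  · -- no 2: both return [-1]
    have hresnil : arr.dropWhile (fun x => decide (x ≠ 2)) = [] := by
      rw [List.dropWhile_eq_nil_iff]
      intro x hx
      simp
      intro h; rw [h] at hx; exact h2 hx
    have hnone : lastIdx2 arr = none := (lastIdx2_eq_none_iff arr).mpr h2
    rw [hresnil, if_neg h2]
    simp [lastIdx2]
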